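-- pv_equiv track=rewrite | github.com/JeongGod/Algo-study | leehyowonzero/14week/12987.py | solution
-- ===== SOURCE A (Python) =====
-- def solution(A, B):
--     answer = 0
--     A.sort()
--     B.sort()
--     a_idx = 0
--     b_idx = 0
--     while a_idx < len(A) and b_idx < len(B):
--         if(A[a_idx] < B[b_idx]):
--             answer += 1
--             a_idx += 1
--             b_idx += 1
--         else:
--             b_idx += 1
--     return answer
-- ===== SOURCE B (Python) =====
-- def solution(A, B):
--     A.sort()
--     B.sort()
--     free = 0
--     answer = 0
--     i = 0
--     for b in B:
--         while i < len(A) and A[i] < b: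
--             free += 1
--             i += 1
--         if free > 0:
--             free -= 1
--             answer += 1
--     return answer
-- ===== Notes on version B (the rewrite author's own statement) =====
-- stated objective: alternative
-- what changed: Replaces the pairing two-pointer greedy with a supply-counting sweep: iterate the sorted B values, pour every A element smaller than the current b into an availability counter, and count a match whenever the counter is positive.
import Mathlib
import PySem

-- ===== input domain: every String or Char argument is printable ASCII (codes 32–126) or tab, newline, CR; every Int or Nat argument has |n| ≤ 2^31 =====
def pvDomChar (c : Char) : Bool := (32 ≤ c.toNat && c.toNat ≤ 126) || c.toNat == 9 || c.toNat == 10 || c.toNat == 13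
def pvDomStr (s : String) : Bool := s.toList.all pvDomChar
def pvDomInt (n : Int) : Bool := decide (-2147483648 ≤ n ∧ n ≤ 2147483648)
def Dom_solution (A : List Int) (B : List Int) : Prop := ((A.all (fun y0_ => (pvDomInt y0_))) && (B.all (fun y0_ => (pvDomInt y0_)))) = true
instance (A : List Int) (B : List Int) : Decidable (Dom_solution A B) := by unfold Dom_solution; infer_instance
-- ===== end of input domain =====

-- B replaces the pairing two-pointer greedy with a supply-counting sweep over sorted B;
-- both A and B sort their list arguments in place in Python — the equivalence proved
-- here is about the return value.

-- ===== PORT A =====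
-- A's while loop: ascending indices, B-index always advances, A-index advances on a match
def loopA (sA sB : List Int) (answer : Int) (ai bi : Nat) : Int :=
  if h : ai < sA.length ∧ bi < sB.length then
    if sA.getD ai 0 < sB.getD bi 0 then
      loopA sA sB (answer + 1) (ai + 1) (bi + 1)
    else
      loopA sA sB answer ai (bi + 1)
  else answer
termination_by sB.length - bi
decreasing_by all_goals omega

def solution (A : List Int) (B : List Int) : Int :=
  let sA := PySem.List.sorted A (fun x => x) false
  let sB := PySem.List.sorted B (fun x => x) false
  loopA sA sB 0 0 0

-- ===== PORT B =====
-- B's inner while loop: pour every still-unseen A element smaller than b into the counter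
def whileAdv (sA : List Int) (b : Int) (i : Nat) (free : Int) : Nat × Int :=
  if h : i < sA.length then
    if sA.getD i 0 < b then whileAdv sA b (i + 1) (free + 1) else (i, free)
  else (i, free)
termination_by sA.length - i
decreasing_by omega

-- B's for loop over the sorted B values, carrying the availability counter
def forB (sA : List Int) (i : Nat) (free answer : Int) : List Int → Int
  | [] => answer
  | b :: bs =>
    let p := whileAdv sA b i free
    if p.2 > 0 then forB sA p.1 (p.2 - 1) (answer + 1) bs
    else forB sA p.1 p.2 answer bs

def solution_alt (A : List Int) (B : List Int) : Int :=
  let sA := PySem.List.sorted A (fun x => x) false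
  let sB := PySem.List.sorted B (fun x => x) false
  forB sA 0 0 0 sB

-- ===== PRECONDITION & SPEC =====
def Spec_solution (A : List Int) (B : List Int) (out : Int) : Prop := out = solution_alt A B
instance (A : List Int) (B : List Int) (out : Int) : Decidable (Spec_solution A B out) := by unfold Spec_solution; infer_instance

-- ===== CLAIM (what is proved, stated in full; the proofs are below) =====
def Claim_equal_solution : Prop := ∀ (A : List Int) (B : List Int), Dom_solution A B → Spec_solution A B (solution A B)

-- ===== LEMMAS AND PROOFS =====

-- structural form of A's greedy (ascending over both sorted lists)
def fgr : List Int → List Int → Int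
  | [], _ => 0
  | _, [] => 0
  | a :: as, b :: bs => if a < b then 1 + fgr as bs else fgr (a :: as) bs
termination_by _ bs => bs.length

-- the greedy with `free` extra credits, each smaller than every remaining B value
def fgrF : List Int → List Int → Int → Int
  | _, [], _ => 0
  | [], _ :: bs, free => if free > 0 then 1 + fgrF [] bs (free - 1) else 0
  | a :: as, b :: bs, free =>
    if free > 0 then 1 + fgrF (a :: as) bs (free - 1)
    else if a < b then 1 + fgrF as bs free else fgrF (a :: as) bs free
termination_by _ bs _ => bs.length

theorem fgr_nil_right (as : List Int) : fgr as [] = 0 := by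
  cases as <;> simp [fgr]

theorem fgrF_nil_right (as : List Int) (free : Int) : fgrF as [] free = 0 := by
  cases as <;> simp [fgrF]

theorem fgr_eq_fgrF : ∀ (bs as : List Int), fgr as bs = fgrF as bs 0 := by
  intro bs
  induction bs with
  | nil => intro as; rw [fgr_nil_right, fgrF_nil_right]
  | cons b bs ih =>
    intro as
    cases as with
    | nil => simp [fgr, fgrF]
    | cons a as =>
      simp only [fgr, fgrF, lt_irrefl, if_false]
      by_cases hab : a < b
      · simp [hab, ih as]
      · simp [hab, ih (a :: as)]

-- converting an A element smaller than every remaining B value into a credit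
theorem fgrF_credit : ∀ (bs : List Int) (a : Int) (as : List Int) (free : Int),
    0 ≤ free → (∀ y ∈ bs, a < y) → fgrF (a :: as) bs free = fgrF as bs (free + 1) := by
  intro bs
  induction bs with
  | nil => intro a as free _ _; rw [fgrF_nil_right, fgrF_nil_right]
  | cons b bs ih =>
    intro a as free hfree hlt
    have hab : a < b := hlt b (by simp)
    have hrhs : fgrF as (b :: bs) (free + 1) = 1 + fgrF as bs (free + 1 - 1) := by
      cases as <;> simp [fgrF, (by omega : free + 1 > 0)]
    by_cases hpos : free > 0
    · have h1 : fgrF (a :: as) (b :: bs) free = 1 + fgrF (a :: as) bs (free - 1) := by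
        simp [fgrF, hpos]
      rw [h1, ih a as (free - 1) (by omega) (fun y hy => hlt y (by simp [hy])), hrhs,
        (by omega : free - 1 + 1 = free), (by omega : free + 1 - 1 = free)]
    · have hz : free = 0 := by omega
      subst hz
      have h1 : fgrF (a :: as) (b :: bs) 0 = 1 + fgrF as bs 0 := by
        simp [fgrF, hab]
      rw [h1, hrhs, (by omega : (0:Int) + 1 - 1 = 0)]

-- after the inner while loop, the next A element (if any) is not below b
theorem whileAdv_head (sA : List Int) (b : Int) : ∀ (i : Nat) (free : Int),
    (whileAdv sA b i free).1 ≥ sA.length ∨ ¬ sA.getD (whileAdv sA b i free).1 0 < b := by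
  intro i free
  fun_induction whileAdv sA b i free with
  | case1 i free h hlt ih => exact ih
  | case2 i free h hlt => exact Or.inr hlt
  | case3 i free h => exact Or.inl (by omega)

theorem whileAdv_free_nonneg (sA : List Int) (b : Int) : ∀ (i : Nat) (free : Int),
    0 ≤ free → 0 ≤ (whileAdv sA b i free).2 := by
  intro i free hf
  fun_induction whileAdv sA b i free with
  | case1 i free h hlt ih => exact ih (by omega)
  | case2 i free h hlt => exact hf
  | case3 i free h => exact hf

-- the inner while loop only converts matchable A elements into credits
theorem whileAdv_fgrF (sA : List Int) (b : Int) (bs : List Int)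
    (hbs : ∀ y ∈ bs, b ≤ y) : ∀ (i : Nat) (free : Int), 0 ≤ free →
    fgrF (sA.drop i) (b :: bs) free =
      fgrF (sA.drop (whileAdv sA b i free).1) (b :: bs) (whileAdv sA b i free).2 := by
  intro i free hf
  fun_induction whileAdv sA b i free with
  | case1 i free h hlt ih =>
    rw [← ih (by omega)]
    rw [List.drop_eq_getElem_cons h]
    rw [List.getD_eq_getElem sA 0 h] at hlt
    exact fgrF_credit (b :: bs) _ _ free hf
      (fun y hy => by
        rcases List.mem_cons.mp hy with h' | h'
        · omega
        · have := hbs y h'; omega)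
  | case2 i free h hlt => rfl
  | case3 i free h => rfl

-- B's for loop computes the credit greedy on the remaining A suffix
theorem forB_eq_fgrF : ∀ (bs : List Int), bs.Pairwise (· ≤ ·) →
    ∀ (sA : List Int) (i : Nat) (free answer : Int), 0 ≤ free →
    forB sA i free answer bs = answer + fgrF (sA.drop i) bs free := by
  intro bs
  induction bs with
  | nil => intro _ sA i free answer _; rw [fgrF_nil_right]; simp [forB]
  | cons b bs ih =>
    intro hp sA i free answer hf
    rw [List.pairwise_cons] at hp
    have hadv := whileAdv_fgrF sA b bs hp.1 i free hf
    have hnn := whileAdv_free_nonneg sA b i free hf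
    have hhead := whileAdv_head sA b i free
    set p := whileAdv sA b i free with hpdef
    simp only [forB, ← hpdef]
    by_cases hpos : p.2 > 0
    · rw [if_pos hpos, ih hp.2 sA p.1 (p.2 - 1) (answer + 1) (by omega), hadv]
      have : fgrF (sA.drop p.1) (b :: bs) p.2 = 1 + fgrF (sA.drop p.1) bs (p.2 - 1) := by
        cases hd : sA.drop p.1 <;> simp [fgrF, hpos]
      rw [this]; ring
    · rw [if_neg hpos, ih hp.2 sA p.1 p.2 answer hnn, hadv]
      have hz : p.2 = 0 := by omega
      cases hd : sA.drop p.1 with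
      | nil => simp [fgrF, hz]; cases bs <;> simp [fgrF]
      | cons x xs =>
        have hlen : p.1 < sA.length := by
          by_contra hcon
          rw [List.drop_eq_nil_of_le (by omega)] at hd; exact (List.cons_ne_nil _ _) hd.symm
        have hx : x = sA.getD p.1 0 := by
          have h2 := List.drop_eq_getElem_cons (l := sA) hlen
          rw [hd] at h2
          rw [List.getD_eq_getElem sA 0 hlen, (List.cons.injEq ..).mp h2 |>.1]
        have hnb : ¬ x < b := by
          rcases hhead with h' | h'
          · omega
          · rw [hx]; exact h'
        simp [fgrF, hz, hnb]

-- A's index loop computes the ascending structural greedy on the remaining suffixes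
theorem loopA_eq_fgr (sA sB : List Int) (answer : Int) (ai bi : Nat) :
    loopA sA sB answer ai bi = answer + fgr (sA.drop ai) (sB.drop bi) := by
  fun_induction loopA sA sB answer ai bi with
  | case1 answer ai bi h hlt ih =>
    rw [ih, List.drop_eq_getElem_cons h.1, List.drop_eq_getElem_cons h.2, fgr,
      if_pos (by rwa [List.getD_eq_getElem sA 0 h.1, List.getD_eq_getElem sB 0 h.2] at hlt)]
    ring
  | case2 answer ai bi h hlt ih =>
    rw [ih, List.drop_eq_getElem_cons h.1, List.drop_eq_getElem_cons h.2, fgr,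
      if_neg (by rwa [List.getD_eq_getElem sA 0 h.1, List.getD_eq_getElem sB 0 h.2] at hlt),
      ← List.drop_eq_getElem_cons h.1]
  | case3 answer ai bi h =>
    rcases (by omega : sA.length ≤ ai ∨ sB.length ≤ bi) with h' | h'
    · rw [List.drop_eq_nil_of_le h']; simp [fgr]
    · rw [List.drop_eq_nil_of_le h', fgr_nil_right]; ring

-- ===== VERDICT (by name: the statement is the Claim_ definition above) =====
theorem solution_spec : Claim_equal_solution := by
  intro A B _
  unfold Spec_solution solution solution_alt
  set sA := PySem.List.sorted A (fun x => x) false with hA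
  set sB := PySem.List.sorted B (fun x => x) false with hB
  have hp : sB.Pairwise (· ≤ ·) :=
    (PySem.List.sorted_pairwise B (fun x => x)).imp (fun h => h)
  rw [loopA_eq_fgr, forB_eq_fgrF sB hp sA 0 0 0 (by omega)]
  simp [fgr_eq_fgrF]
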